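-- pv_equiv track=rewrite | github.com/anjaeha/CodingTest | 프로그래머스_문제풀이/2개이하로다른비트.py | solution
-- ===== SOURCE A (Python) =====
-- def solution(numbers):
--     answer = []
--
--     for number in numbers:
--         if number % 2 == 0:
--             answer.append(number + 1)
--         else:
--             temp = ['0'] + list(bin(number)[2:])
--             for i in range(1, len(temp) + 1):
--                 if temp[-i] == '0':
--                     temp[-i] = '1'
--                     temp[-i + 1] = '0'
--                     break
--             answer.append(int(''.join(temp), 2))
--     return answer
-- ===== SOURCE B (Python) =====
-- def _next(n):
--     if n % 2 == 0:
--         return n + 1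
--     bit = (~n) & (n + 1)          # lowest zero bit of n (= lowest set bit of n+1)
--     return n + bit - (bit >> 1)
--
-- def solution(numbers):
--     return [_next(n) for n in numbers]
-- ===== Notes on version B (the rewrite author's own statement) =====
-- stated objective: simpler
-- what changed: Per odd element, the binary-string build (bin/list/join/int reparse) and the positional scan loop are replaced by the closed-form bit trick bit = (~n) & (n+1), answer n + bit - (bit >> 1); the even branch stays n+1.
-- outside the precondition, e.g. on solution([-3]): A returns [11], B returns [-2]; on solution([-1, 10]): A returns [5, 11], B returns [-1, 11]
import Mathlib
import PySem

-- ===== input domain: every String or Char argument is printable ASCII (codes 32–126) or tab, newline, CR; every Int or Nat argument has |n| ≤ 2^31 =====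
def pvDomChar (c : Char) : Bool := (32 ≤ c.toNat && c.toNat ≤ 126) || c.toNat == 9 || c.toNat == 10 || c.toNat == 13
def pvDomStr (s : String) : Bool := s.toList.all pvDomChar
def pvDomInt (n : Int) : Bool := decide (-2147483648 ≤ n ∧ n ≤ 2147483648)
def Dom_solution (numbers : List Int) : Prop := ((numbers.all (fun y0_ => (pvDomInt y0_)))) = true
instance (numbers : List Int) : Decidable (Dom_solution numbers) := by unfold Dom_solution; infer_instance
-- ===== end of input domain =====

-- B replaces A's per-element binary-string build/scan/reparse by the closed-form
-- lowest-zero-bit trick (simpler); Pre_ excludes lists with a negative odd element, see Pre_.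

-- ===== PORT A =====
-- bin(n) for a Nat, digits only (MSB first); fuel-structural so the kernel can evaluate it
def binAux : Nat → Nat → List Char
  | 0, _ => []   -- unreachable with fuel = n+1
  | fuel+1, n =>
      if n < 2 then [if n = 1 then '1' else '0']
      else binAux fuel (n / 2) ++ [if n % 2 = 1 then '1' else '0']

-- bin(number)[2:] : for n ≥ 0 drops '0b', for n < 0 drops '-0' leaving 'b' ++ digits
def pyBinDrop2 (n : Int) : List Char :=
  if n < 0 then 'b' :: binAux ((-n).toNat + 1) (-n).toNat else binAux (n.toNat + 1) n.toNat

-- the scan 'for i in range(1, len(temp)+1): if temp[-i] == '0': temp[-i]='1'; temp[-i+1]='0'; break'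
-- (temp[-i] is index len-i; temp[-i+1] is index (len-i+1) % len, i.e. index 0 when i = 1)
def fixGo (temp : List Char) : Nat → Nat → List Char
  | 0, _ => temp
  | rem+1, i =>
      if temp[temp.length - i]? = some '0' then
        (temp.set (temp.length - i) '1').set ((temp.length - i + 1) % temp.length) '0'
      else fixGo temp rem (i+1)

-- int(''.join(temp), 2): exact for the strings this program produces
-- (nonempty '0'/'1' digit strings, optionally prefixed by '0b')
def parseBin2 (cs : List Char) : Int :=
  (if cs.take 2 = ['0', 'b'] then cs.drop 2 else cs).foldl
    (fun acc c => acc * 2 + (if c = '1' then 1 else 0)) 0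

def solution (numbers : List Int) : List Int :=
  numbers.foldl (fun answer number =>
    if number % 2 = 0 then answer ++ [number + 1]
    else
      let temp := '0' :: pyBinDrop2 number
      answer ++ [parseBin2 (fixGo temp temp.length 1)]) []

-- ===== PORT B =====
def nextAlt (n : Int) : Int :=
  if n % 2 = 0 then n + 1
  else
    let bit := Int.land (Int.not n) (n + 1)
    n + bit - Int.shiftRight bit 1

def solution_alt (numbers : List Int) : List Int := numbers.map nextAlt

-- ===== PRECONDITION & SPEC =====
-- Pre_ excludes lists containing a negative odd number: there A still returns, but its value is
-- an accident of scanning bin(n)[2:] with the minus sign dropped and the '0b' prefix mangled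
-- (an unrelated nonnegative number comes back), while B returns the value of the same
-- lowest-zero-bit rule applied arithmetically to n; see the cites in claim.json.
def Pre_solution (numbers : List Int) : Prop := ∀ n ∈ numbers, ¬ (n < 0 ∧ n % 2 = 1)
instance (numbers : List Int) : Decidable (Pre_solution numbers) := by
  unfold Pre_solution; infer_instance

def pvWitness_solution : List Int := [2, 7, 0, -4]

def Spec_solution (numbers : List Int) (out : List Int) : Prop := out = solution_alt numbers
instance (numbers : List Int) (out : List Int) : Decidable (Spec_solution numbers out) := by
  unfold Spec_solution; infer_instance

-- ===== CLAIM (what is proved, stated in full; the proofs are below) =====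
def Claim_equal_solution : Prop :=
  ∀ (numbers : List Int), Dom_solution numbers → Pre_solution numbers →
    Spec_solution numbers (solution numbers)


-- ===== LEMMAS AND PROOFS =====

-- trailing zeros of a (proof-side only)
def tz (a : Nat) : Nat :=
  if a = 0 then 0 else if a % 2 = 1 then 0 else tz (a / 2) + 1
termination_by a
decreasing_by exact Nat.div_lt_self (by omega) (by omega)

-- the digit-fold step of parseBin2
def pstep (acc : Int) (c : Char) : Int := acc * 2 + (if c = '1' then 1 else 0)

-- A's per-element value, as solution maps it
def nextA (n : Int) : Int :=
  if n % 2 = 0 then n + 1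
  else
    let temp := '0' :: pyBinDrop2 n
    parseBin2 (fixGo temp temp.length 1)

theorem solution_foldl (l : List Int) : ∀ acc : List Int,
    l.foldl (fun answer number =>
      if number % 2 = 0 then answer ++ [number + 1]
      else
        let temp := '0' :: pyBinDrop2 number
        answer ++ [parseBin2 (fixGo temp temp.length 1)]) acc = acc ++ l.map nextA := by
  induction l with
  | nil => intro acc; simp
  | cons n l ih =>
    intro acc
    simp only [List.foldl, List.map]
    rw [ih]
    by_cases h : n % 2 = 0 <;> simp [nextA, h]

theorem solution_eq_map (numbers : List Int) : solution numbers = numbers.map nextA := by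
  unfold solution
  rw [solution_foldl]
  simp

theorem binAux_irrel (f : Nat) : ∀ g n, n < f → n < g → binAux f n = binAux g n := by
  induction f with
  | zero => intro g n h; omega
  | succ f ih =>
    intro g n hf hg
    cases g with
    | zero => omega
    | succ g =>
      simp only [binAux]
      by_cases h2 : n < 2
      · simp [h2]
      · simp only [h2, if_false]
        rw [ih g (n / 2) (by omega) (by omega)]

theorem binAux_val (f : Nat) : ∀ n, n < f → (binAux f n).foldl pstep 0 = (n : Int) := by
  induction f with
  | zero => intro n h; omega
  | succ f ih =>
    intro n hf
    simp only [binAux]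
    by_cases h2 : n < 2
    · interval_cases n <;> simp [pstep]
    · simp only [h2, if_false, List.foldl_append, ih (n / 2) (by omega)]
      simp only [List.foldl, pstep]
      by_cases hm : n % 2 = 1 <;> simp [hm] <;> omega

theorem binAux_chars (f : Nat) : ∀ n, ∀ c ∈ binAux f n, c = '0' ∨ c = '1' := by
  induction f with
  | zero => intro n c h; simp [binAux] at h
  | succ f ih =>
    intro n c h
    simp only [binAux] at h
    by_cases h2 : n < 2
    · simp [h2] at h; split at h <;> simp [h]
    · simp only [h2, if_false, List.mem_append] at h
      rcases h with h | h
      · exact ih _ c h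
      · simp at h; split at h <;> simp [h]

theorem ones_fold (j : Nat) (a : Int) :
    (List.replicate j '1').foldl pstep a = a * 2 ^ j + (2 ^ j - 1) := by
  induction j generalizing a with
  | zero => simp
  | succ j ih =>
    rw [List.replicate_succ, List.foldl_cons, ih]
    simp only [pstep]
    norm_num
    ring

theorem tz_pos (m : Nat) (h : m % 2 = 1) : 1 ≤ tz (m + 1) := by
  rw [tz]
  simp [show ¬ ((m + 1) % 2 = 1) by omega]

theorem bin_decomp (m : Nat) : m % 2 = 1 →
    ∃ L, '0' :: binAux (m + 1) m = L ++ '0' :: List.replicate (tz (m + 1)) '1' := by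
  induction m using Nat.strong_induction_on with
  | _ m ih =>
    intro hodd
    by_cases h1 : m = 1
    · subst h1
      refine ⟨[], ?_⟩
      have htz : tz 2 = 1 := by
        rw [tz]; norm_num; rw [tz]; norm_num
      rw [htz]
      simp [binAux]
    · have hm3 : 3 ≤ m := by omega
      have hstep : binAux (m + 1) m = binAux (m / 2 + 1) (m / 2) ++ ['1'] := by
        rw [show binAux (m + 1) m = if m < 2 then [if m = 1 then '1' else '0']
              else binAux m (m / 2) ++ [if m % 2 = 1 then '1' else '0'] from rfl]
        rw [if_neg (by omega), if_pos hodd]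
        rw [binAux_irrel m (m / 2 + 1) (m / 2) (by omega) (by omega)]
      by_cases h4 : m % 4 = 1
      · -- m ≡ 1 mod 4: m/2 is even and ≥ 2; its bits end in '0'
        have htz : tz (m + 1) = 1 := by
          rw [tz]; simp only [show ¬ (m + 1 = 0) by omega, show ¬ ((m + 1) % 2 = 1) by omega,
            if_false]
          rw [tz]; simp [show ¬ ((m + 1) / 2 = 0) by omega, show ((m + 1) / 2) % 2 = 1 by omega]
        have hhalf : binAux (m / 2 + 1) (m / 2)
            = binAux (m / 2) (m / 4) ++ ['0'] := by
          rw [show binAux (m / 2 + 1) (m / 2) = if m / 2 < 2 then [if m / 2 = 1 then '1' else '0']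
                else binAux (m / 2) (m / 2 / 2) ++ [if (m / 2) % 2 = 1 then '1' else '0'] from rfl]
          rw [if_neg (by omega), if_neg (by omega)]
          rw [show m / 2 / 2 = m / 4 by omega]
        refine ⟨'0' :: binAux (m / 2) (m / 4), ?_⟩
        rw [htz, hstep, hhalf]
        simp
      · -- m ≡ 3 mod 4: m/2 is odd, recurse
        have hmod : m % 4 = 3 := by omega
        have hhalf_odd : (m / 2) % 2 = 1 := by omega
        obtain ⟨L, hL⟩ := ih (m / 2) (by omega) hhalf_odd
        have htz : tz (m + 1) = tz (m / 2 + 1) + 1 := by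
          rw [tz]; simp only [show ¬ (m + 1 = 0) by omega, show ¬ ((m + 1) % 2 = 1) by omega,
            if_false]
          rw [show (m + 1) / 2 = m / 2 + 1 by omega]
        refine ⟨L, ?_⟩
        rw [htz, hstep, List.replicate_succ']
        rw [show ('0' : Char) :: (binAux (m / 2 + 1) (m / 2) ++ ['1'])
              = ('0' :: binAux (m / 2 + 1) (m / 2)) ++ ['1'] from rfl, hL]
        simp

theorem set_append_cons {α : Type} (L : List α) (c c' : α) (r : List α) :
    (L ++ c :: r).set L.length c' = L ++ c' :: r := by
  induction L with
  | nil => simp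
  | cons x L ih => simp [ih]

theorem fixGo_skip (L : List Char) (k : Nat) (hk : 1 ≤ k) :
    ∀ rem i, 1 ≤ i → i + rem = L.length + k + 2 → i ≤ k + 1 →
      fixGo (L ++ '0' :: List.replicate k '1') rem i
        = L ++ '1' :: '0' :: List.replicate (k - 1) '1' := by
  intro rem
  induction rem with
  | zero => intro i h1 h2 h3; omega
  | succ rem ih =>
    intro i h1 h2 h3
    have hlen : (L ++ '0' :: List.replicate k '1').length = L.length + k + 1 := by simp; omega
    by_cases hik : i = k + 1
    · -- found the '0'
      subst hik
      have hidx : (L ++ '0' :: List.replicate k '1').length - (k + 1) = L.length := by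
        rw [hlen]; omega
      have hget : (L ++ '0' :: List.replicate k '1')[L.length]? = some '0' := by
        rw [List.getElem?_append_right (by omega)]
        simp
      simp only [fixGo, hidx, hget, if_pos]
      rw [Nat.mod_eq_of_lt (by omega)]
      rw [set_append_cons]
      rw [show List.replicate k '1' = '1' :: List.replicate (k - 1) '1' by
            rw [← List.replicate_succ]; congr 1; omega]
      rw [show L ++ '1' :: '1' :: List.replicate (k - 1) '1'
            = (L ++ ['1']) ++ '1' :: List.replicate (k - 1) '1' by simp]
      rw [show L.length + 1 = (L ++ ['1']).length by simp]
      rw [set_append_cons]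
      simp
    · -- still scanning the trailing ones
      have hget : (L ++ '0' :: List.replicate k '1')[(L ++ '0' :: List.replicate k '1').length - i]? = some '1' := by
        rw [hlen, List.getElem?_append_right (by omega)]
        rw [show L.length + k + 1 - i - L.length = k + 1 - i by omega]
        rw [show (('0' : Char) :: List.replicate k '1')[k + 1 - i]? = (List.replicate k '1')[k - i]? by
              rw [show k + 1 - i = (k - i) + 1 by omega]; rfl]
        rw [List.getElem?_replicate]
        simp [show k - i < k by omega]
      simp only [fixGo, hget]
      norm_num
      exact ih (i + 1) (by omega) (by omega) (by omega)

theorem parse_no_b (cs : List Char) (h : ∀ c ∈ cs, c ≠ 'b') :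
    parseBin2 cs = cs.foldl pstep 0 := by
  unfold parseBin2
  rw [if_neg]
  · rfl
  · intro htake
    have : 'b' ∈ cs := by
      have : 'b' ∈ cs.take 2 := by rw [htake]; simp
      exact List.mem_of_mem_take this
    exact h 'b' this rfl

theorem ldiff_parity (a b e1 e2 : Nat) (h1 : e1 ≤ 1) (h2 : e2 ≤ 1) :
    Nat.ldiff (2 * a + e1) (2 * b + e2) = 2 * Nat.ldiff a b + (if e1 = 1 ∧ e2 = 0 then 1 else 0) := by
  apply Nat.eq_of_testBit_eq
  intro i
  cases i with
  | zero =>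
    rw [Nat.testBit_ldiff]
    simp only [Nat.testBit_zero]
    rcases Nat.le_one_iff_eq_zero_or_eq_one.mp h1 with rfl | rfl <;>
      rcases Nat.le_one_iff_eq_zero_or_eq_one.mp h2 with rfl | rfl <;>
      simp [Nat.mul_mod_right]
  | succ i =>
    rw [Nat.testBit_ldiff]
    simp only [Nat.testBit_succ]
    rw [Nat.mul_add_div (by norm_num : 0 < 2), Nat.mul_add_div (by norm_num : 0 < 2),
        Nat.mul_add_div (by norm_num : 0 < 2)]
    rw [show e1 / 2 = 0 by omega, show e2 / 2 = 0 by omega,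
        show (if e1 = 1 ∧ e2 = 0 then 1 else 0) / 2 = 0 by split <;> omega]
    simp only [Nat.add_zero]
    rw [Nat.testBit_ldiff]

theorem ldiff_even_odd (c d : Nat) : Nat.ldiff (2 * c) (2 * d + 1) = 2 * Nat.ldiff c d := by
  have h := ldiff_parity c d 0 1 (by omega) (by omega)
  simpa using h

theorem ldiff_odd_even (c d : Nat) : Nat.ldiff (2 * c + 1) (2 * d) = 2 * Nat.ldiff c d + 1 := by
  have h := ldiff_parity c d 1 0 (by omega) (by omega)
  simpa using h

theorem ldiff_lowbit (a : Nat) : 1 ≤ a → Nat.ldiff a (a - 1) = 2 ^ tz a := by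
  induction a using Nat.strong_induction_on with
  | _ a ih =>
    intro ha
    rcases Nat.even_or_odd a with ⟨c, hc⟩ | ⟨c, hc⟩
    · have hc' : a = 2 * c := by omega
      have hc1 : 1 ≤ c := by omega
      have hm1 : a - 1 = 2 * (c - 1) + 1 := by omega
      rw [hm1, hc', ldiff_even_odd]
      have htz : tz a = tz c + 1 := by
        rw [tz]; simp [show a ≠ 0 by omega, show ¬ (a % 2 = 1) by omega, show a / 2 = c by omega]
      rw [ih c (by omega) hc1, ← hc', htz, pow_succ]; ring
    · have hc' : a = 2 * c + 1 := by omega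
      have hm1 : a - 1 = 2 * c := by omega
      rw [hm1, hc', ldiff_odd_even]
      have hself : Nat.ldiff c c = 0 := by
        apply Nat.eq_of_testBit_eq; intro i
        rw [Nat.testBit_ldiff]; simp
      have htz : tz a = 0 := by
        rw [tz]; simp [show ¬ (a = 0) by omega, show a % 2 = 1 by omega]
      rw [hself, ← hc', htz]
      simp

theorem nextAlt_odd (m : Nat) (h : m % 2 = 1) :
    nextAlt (m : Int) = (m : Int) + 2 ^ tz (m + 1) - 2 ^ (tz (m + 1) - 1) := by
  have hmod : (m : Int) % 2 = 1 := by omega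
  unfold nextAlt
  rw [if_neg (by omega)]
  have hnot : Int.not (m : Int) = Int.negSucc m := rfl
  have hadd : (m : Int) + 1 = Int.ofNat (m + 1) := rfl
  have hland : Int.land (Int.negSucc m) (Int.ofNat (m + 1)) = Int.ofNat (Nat.ldiff (m + 1) m) := rfl
  show (m : Int) + Int.land (Int.not (m : Int)) ((m : Int) + 1)
        - Int.shiftRight (Int.land (Int.not (m : Int)) ((m : Int) + 1)) 1
      = (m : Int) + 2 ^ tz (m + 1) - 2 ^ (tz (m + 1) - 1)
  rw [hnot, hadd, hland]
  rw [show Nat.ldiff (m + 1) m = 2 ^ tz (m + 1) from by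
        have := ldiff_lowbit (m + 1) (by omega); simpa using this]
  rw [show Int.shiftRight (Int.ofNat (2 ^ tz (m + 1))) 1
        = Int.ofNat (2 ^ tz (m + 1) >>> 1) from rfl]
  rw [Nat.shiftRight_eq_div_pow]
  have hk : 1 ≤ tz (m + 1) := tz_pos m h
  rw [show 2 ^ tz (m + 1) / 2 ^ 1 = 2 ^ (tz (m + 1) - 1) from by
        rw [show tz (m + 1) = (tz (m + 1) - 1) + 1 by omega, pow_succ]
        simp]
  simp only [Int.ofNat_eq_natCast]
  push_cast
  ring

theorem nextA_odd (m : Nat) (h : m % 2 = 1) :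
    nextA (m : Int) = (m : Int) + 2 ^ (tz (m + 1) - 1) := by
  unfold nextA
  rw [if_neg (by omega)]
  have hbin : pyBinDrop2 (m : Int) = binAux (m + 1) m := by
    unfold pyBinDrop2
    rw [if_neg (by omega)]
    norm_num
  simp only [hbin]
  set k := tz (m + 1) with hkdef
  have hk : 1 ≤ k := tz_pos m h
  obtain ⟨L, hL⟩ := bin_decomp m h
  rw [hL]
  have hLlen : (L ++ '0' :: List.replicate k '1').length = L.length + k + 2 - 1 := by
    simp; omega
  rw [hLlen, fixGo_skip L k hk _ 1 (by omega) (by omega) (by omega)]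
  have hchars : ∀ c ∈ L ++ '1' :: '0' :: List.replicate (k - 1) '1', c ≠ 'b' := by
    intro c hc
    simp only [List.mem_append, List.mem_cons] at hc
    rcases hc with hc | hc | hc | hc
    · have : c ∈ '0' :: binAux (m + 1) m := by rw [hL]; simp [hc]
      rcases this with _ | hmem
      · decide
      · rcases binAux_chars (m + 1) m c (by assumption) with rfl | rfl <;> decide
    · subst hc; decide
    · subst hc; decide
    · rw [List.eq_of_mem_replicate hc]; decide
  rw [parse_no_b _ hchars]
  -- value computation
  have hm : (m : Int) = (L.foldl pstep 0) * 2 ^ (k + 1) + (2 ^ k - 1) := by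
    have h1 : ('0' :: binAux (m + 1) m).foldl pstep 0 = (m : Int) := by
      simp only [List.foldl]
      rw [show pstep 0 '0' = 0 from by simp [pstep]]
      exact binAux_val (m + 1) m (by omega)
    rw [hL] at h1
    rw [List.foldl_append] at h1
    simp only [List.foldl] at h1
    rw [show pstep (L.foldl pstep 0) '0' = (L.foldl pstep 0) * 2 from by simp [pstep]] at h1
    rw [ones_fold] at h1
    rw [← h1, pow_succ]
    ring
  rw [List.foldl_append]
  simp only [List.foldl]
  rw [show pstep (L.foldl pstep 0) '1' = (L.foldl pstep 0) * 2 + 1 from by simp [pstep]]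
  rw [show pstep ((L.foldl pstep 0) * 2 + 1) '0' = ((L.foldl pstep 0) * 2 + 1) * 2 from by simp [pstep]]
  rw [ones_fold]
  obtain ⟨j, hj⟩ : ∃ j, k = j + 1 := ⟨k - 1, by omega⟩
  rw [hj] at hm ⊢
  rw [hm]
  norm_num [pow_succ]
  ring

theorem next_agree (n : Int) (h : ¬ (n < 0 ∧ n % 2 = 1)) : nextA n = nextAlt n := by
  by_cases he : n % 2 = 0
  · unfold nextA nextAlt
    rw [if_pos he, if_pos he]
  · have hodd : n % 2 = 1 := by omega
    have hnn : 0 ≤ n := by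
      by_contra hneg
      exact h ⟨by omega, hodd⟩
    obtain ⟨m, rfl⟩ := Int.eq_ofNat_of_zero_le hnn
    have hmodd : m % 2 = 1 := by omega
    rw [nextA_odd m hmodd, nextAlt_odd m hmodd]
    have hk : 1 ≤ tz (m + 1) := tz_pos m hmodd
    obtain ⟨j, hj⟩ : ∃ j, tz (m + 1) = j + 1 := ⟨tz (m + 1) - 1, by omega⟩
    rw [hj]
    norm_num [pow_succ]
    ring

theorem solution_spec : Claim_equal_solution := by
  intro numbers _ hpre
  show solution numbers = solution_alt numbers
  rw [solution_eq_map]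
  unfold solution_alt
  rw [List.map_inj_left]
  intro n hn
  exact next_agree n (hpre n hn)
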